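-- pv_equiv track=rewrite | github.com/HackerUnranked/LeetCode | Easy/Python3/1441_Build_Array_Stack_Operations.py | buildArray_2
-- ===== SOURCE A (Python) =====
-- from typing import List
--
-- def buildArray_2(target: List[int], n: int) -> List[str]:
--     prev = 1 # keeps track of number we are at
--     a = [] # the array to return
--     idx = 0 # idx of the array
--
--     # loop while the index is less than the length of the list
--     while idx < len(target):
--         # push the number the pop if we are less
--         # note we cannot pop consecutively so this means
--         # after every push we have to pop if we are smaller
--         # than the target value
--         if prev < target[idx]:
--             # special case if the list is empty we need to
--             # push until we reach the targeted number
--             if a == []: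
--                 for x in range(target[idx] - prev):
--                     a.append("Push")
--                     a.append("Pop")
--             # if the list isn't empty we just push and pop from the numbers
--             # in between, this means we don't include the last number
--             else:
--                 for x in range((target[idx] - prev) - 1):
--                     a.append("Push")
--                     a.append("Pop")
--
--         a.append('Push')
--
--         prev = target[idx]
--         idx += 1
--
--     return a
-- ===== SOURCE B (Python) =====
-- def buildArray_2(target, n):
--     # Two-pointer stream machine: one flat loop; each step either takes the
--     # stream's current integer as the next wanted value (Push) or discards one
--     # unwanted integer (Push, Pop).  No gap arithmetic, no inner loops.
--     ops = []
--     i = 1                       # next integer the input stream offers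
--     k = 0                       # index of the next target value still to produce
--     while k < len(target):
--         if i >= target[k]:      # stream at/past the wanted value: take it
--             ops.append("Push")
--             i = target[k] + 1
--             k += 1
--         else:                   # discard one unwanted integer
--             ops.append("Push")
--             ops.append("Pop")
--             i += 1
--     return ops
-- ===== Notes on version B (the rewrite author's own statement) =====
-- stated objective: alternative
-- what changed: B is a two-pointer stream machine: one flat loop over a number-line pointer i and a target pointer k that per step either Pushes the wanted value (advancing k) or Push/Pops one unwanted integer (advancing i), replacing A's while-over-target with a prev variable, an empty-output special case and two computed-size inner append loops.
import Mathlib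
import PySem

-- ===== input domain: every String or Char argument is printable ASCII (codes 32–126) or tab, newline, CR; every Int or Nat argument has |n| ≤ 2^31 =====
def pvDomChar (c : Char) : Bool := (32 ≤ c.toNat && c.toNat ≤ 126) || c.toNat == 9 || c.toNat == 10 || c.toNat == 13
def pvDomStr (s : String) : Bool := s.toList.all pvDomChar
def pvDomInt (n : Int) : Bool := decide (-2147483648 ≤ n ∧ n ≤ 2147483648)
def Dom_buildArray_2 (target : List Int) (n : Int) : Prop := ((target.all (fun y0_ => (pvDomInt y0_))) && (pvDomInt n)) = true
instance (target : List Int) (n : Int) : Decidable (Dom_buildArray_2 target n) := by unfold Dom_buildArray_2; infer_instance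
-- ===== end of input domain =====

-- B replaces A's while-over-target (prev variable, empty-output special case,
-- two computed-size inner append loops) by a two-pointer stream machine: one
-- flat loop that per step either takes the wanted value or discards one
-- unwanted integer (objective: alternative, same cost).

-- ===== PORT A =====
-- inner 'for x in range(k): a.append("Push"); a.append("Pop")'
def pvPairsFold (a : List String) (k : Int) : List String :=
  (PySem.List.pyRange 0 k 1).foldl (fun acc _ => (acc ++ ["Push"]) ++ ["Pop"]) a

-- the while loop over idx, carried as structural recursion on the remaining list
def pvGoA : List Int → Int → List String → List String
  | [], _, a => a
  | t :: rest, prev, a =>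
      let a' := if prev < t then
          (if a = [] then pvPairsFold a (t - prev) else pvPairsFold a (t - prev - 1))
        else a
      pvGoA rest t (a' ++ ["Push"])

def buildArray_2 (target : List Int) (_n : Int) : List String :=
  pvGoA target 1 []

-- ===== PORT B =====
-- the while loop over (i, k): the untraversed suffix target[k:] is the list
-- argument; each step consumes either one unwanted integer or one target value
def pvGoB : List Int → Int → List String → List String
  | [], _, ops => ops
  | t :: rest, i, ops =>
      if t ≤ i then pvGoB rest (t + 1) (ops ++ ["Push"])
      else pvGoB (t :: rest) (i + 1) ((ops ++ ["Push"]) ++ ["Pop"])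
termination_by l i _ => (l.length, (l.headD 0 - i).toNat)
decreasing_by
· simp only [List.length_cons]
  exact Prod.Lex.left _ _ (by omega)
· exact Prod.Lex.right _ (by simp; omega)

def buildArray_2_alt (target : List Int) (_n : Int) : List String :=
  pvGoB target 1 []

-- ===== PRECONDITION & SPEC =====
def Spec_buildArray_2 (target : List Int) (n : Int) (out : List String) : Prop := out = buildArray_2_alt target n
instance (target : List Int) (n : Int) (out : List String) : Decidable (Spec_buildArray_2 target n out) := by unfold Spec_buildArray_2; infer_instance

-- ===== CLAIM (what is proved, stated in full; the proofs are below) =====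
def Claim_equal_buildArray_2 : Prop := ∀ (target : List Int) (n : Int), Dom_buildArray_2 target n → Spec_buildArray_2 target n (buildArray_2 target n)

-- ===== LEMMAS AND PROOFS =====

-- normal form of one segment of the output between consecutive target values
def pvSeg (pt : Int × Int) : List String :=
  (List.replicate (max (pt.2 - pt.1 - 1) 0).toNat ["Push", "Pop"]).flatten ++ ["Push"]

-- A-side: the fold over a range appends length-many "Push","Pop" pairs
theorem pvFold_pairs (l : List Int) (a : List String) :
    l.foldl (fun acc _ => (acc ++ ["Push"]) ++ ["Pop"]) a
      = a ++ (List.replicate l.length ["Push", "Pop"]).flatten := by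
  induction l generalizing a with
  | nil => simp
  | cons x xs ih => simp [List.foldl, List.replicate_succ]

theorem pvPairsFold_eq (a : List String) (k : Int) :
    pvPairsFold a k = a ++ (List.replicate k.toNat ["Push", "Pop"]).flatten := by
  rw [pvPairsFold, pvFold_pairs, PySem.List.length_pyRange_one]
  norm_num

theorem pvSeg_eq (p t : Int) :
    pvSeg (p, t) = (List.replicate (t - p - 1).toNat ["Push", "Pop"]).flatten ++ ["Push"] := by
  have : (max (t - p - 1) 0).toNat = (t - p - 1).toNat := by omega
  simp [pvSeg, this]

theorem pvGoA_eq (rest : List Int) (prev : Int) (a : List String) (ha : a ≠ []) :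
    pvGoA rest prev a = a ++ ((prev :: rest).zip rest).flatMap pvSeg := by
  induction rest generalizing prev a with
  | nil => simp [pvGoA]
  | cons t tl ih =>
      have step : pvGoA (t :: tl) prev a = pvGoA tl t (a ++ pvSeg (prev, t)) := by
        by_cases h : prev < t
        · simp [pvGoA, h, ha, pvPairsFold_eq, pvSeg_eq, List.append_assoc]
        · have hz : (t - prev - 1).toNat = 0 := by omega
          simp [pvGoA, h, pvSeg_eq, hz]
      rw [step, ih t (a ++ pvSeg (prev, t)) (by simp [pvSeg])]
      simp [List.zip, List.append_assoc]

-- A's result in normal form, for every target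
theorem pvA_eq (target : List Int) (n : Int) :
    buildArray_2 target n = ((0 :: target).zip target).flatMap pvSeg := by
  unfold buildArray_2
  cases target with
  | nil => simp [pvGoA]
  | cons t tl =>
      have hfirst : pvGoA (t :: tl) 1 [] = pvGoA tl t (pvSeg (0, t)) := by
        by_cases h : (1 : Int) < t
        · have h1 : (t - 1).toNat = (t - 0 - 1).toNat := by omega
          simp [pvGoA, h, pvPairsFold_eq, pvSeg_eq, h1]
        · have hz0 : (t - 0 - 1).toNat = 0 := by omega
          rw [pvSeg_eq, hz0]
          simp [pvGoA, h]
      rw [hfirst, pvGoA_eq tl t (pvSeg (0, t)) (by simp [pvSeg])]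
      simp [List.zip]

-- B-side: climbing from p+1 up to one target value t emits exactly one segment
theorem pvGoB_seg (k : Nat) : ∀ (p t : Int) (rest : List Int) (ops : List String),
    (t - p - 1).toNat = k →
    pvGoB (t :: rest) (p + 1) ops = pvGoB rest (t + 1) (ops ++ pvSeg (p, t)) := by
  induction k with
  | zero =>
      intro p t rest ops hk
      have hle : t ≤ p + 1 := by omega
      have hz : (t - p - 1).toNat = 0 := hk
      rw [pvGoB, if_pos hle, pvSeg_eq, hz]
      simp
  | succ k ih =>
      intro p t rest ops hk
      have hgt : ¬ t ≤ p + 1 := by omega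
      rw [pvGoB, if_neg hgt]
      rw [ih (p + 1) t rest _ (by omega)]
      rw [pvSeg_eq, pvSeg_eq, show (t - p - 1).toNat = k + 1 from hk,
        show (t - (p + 1) - 1).toNat = k from by omega, List.replicate_succ]
      simp

-- B's machine, run from any resumption point p, emits the remaining segments
theorem pvGoB_eq (rest : List Int) : ∀ (p : Int) (ops : List String),
    pvGoB rest (p + 1) ops = ops ++ ((p :: rest).zip rest).flatMap pvSeg := by
  induction rest with
  | nil => intro p ops; simp [pvGoB]
  | cons t tl ih =>
      intro p ops
      rw [pvGoB_seg (t - p - 1).toNat p t tl ops rfl, ih t (ops ++ pvSeg (p, t))]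
      simp [List.zip]

-- ===== VERDICT (by name: the statement is the Claim_ definition above) =====
theorem buildArray_2_spec : Claim_equal_buildArray_2 := by
  intro target n _
  unfold Spec_buildArray_2
  rw [pvA_eq, buildArray_2_alt,
    show (1 : Int) = 0 + 1 from by norm_num, pvGoB_eq]
  simp
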